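-- pv_equiv track=rewrite | github.com/YMGB96/SchoolProject-StrategyGames | board_blitz/ai.py | highest_ai_stone
-- ===== SOURCE A (Python) =====
-- def highest_ai_stone(checkers_board, ai_num):
--     # indices start at 0 so we have a position of (0, 0)
--     highest_row = -1
--     highest_col = -1
--     # loop through the whole board searching for ai stones
--     for row in range(len(checkers_board)):
--         for col in range(len(checkers_board[row])):
--             # if a ai stone is found it compares the row number to the highest_row
--             if checkers_board[row][col] == ai_num:
--                 if row > highest_row:
--                     # updates the highest_row and _col with the new position
--                     highest_row = row
--                     highest_col = col
--     # if highest row and highest column still have their values -1 it returns None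
--     # to indicate that there are no ai stones on the board
--     if highest_row == -1 and highest_col == -1:
--         return None
--     # If it found a stone it returns the row and column position of the highest ai stone
--     else:
--         return (highest_row, highest_col)
-- ===== SOURCE B (Python) =====
-- def highest_ai_stone(checkers_board, ai_num):
--     # scan rows bottom-up; the first row containing an AI stone is the
--     # bottom-most one, and list.index gives the leftmost column in it
--     for row in range(len(checkers_board) - 1, -1, -1):
--         if ai_num in checkers_board[row]:
--             return (row, checkers_board[row].index(ai_num))
--     return None
-- ===== Notes on version B (the rewrite author's own statement) =====
-- stated objective: idiomatic
-- what changed: Instead of exhaustively scanning every cell while maintaining highest_row/highest_col accumulators and a final -1 sentinel check, B scans rows bottom-up and returns immediately at the first row containing ai_num, using membership and list.index for the leftmost column.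
import Mathlib
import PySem

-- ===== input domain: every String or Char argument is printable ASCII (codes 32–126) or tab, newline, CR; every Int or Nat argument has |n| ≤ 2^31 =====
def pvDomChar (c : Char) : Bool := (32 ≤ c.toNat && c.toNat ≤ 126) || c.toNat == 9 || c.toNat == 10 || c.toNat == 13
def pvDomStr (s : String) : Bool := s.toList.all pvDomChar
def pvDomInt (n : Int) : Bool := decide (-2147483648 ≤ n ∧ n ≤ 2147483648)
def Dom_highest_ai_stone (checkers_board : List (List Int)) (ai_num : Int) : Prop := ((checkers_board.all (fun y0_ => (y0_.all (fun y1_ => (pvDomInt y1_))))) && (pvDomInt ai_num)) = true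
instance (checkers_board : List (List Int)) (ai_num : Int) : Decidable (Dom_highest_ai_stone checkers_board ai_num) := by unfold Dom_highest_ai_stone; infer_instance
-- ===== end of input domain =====

-- B scans rows bottom-up and returns at the first row containing ai_num (early exit),
-- instead of A's exhaustive full-board scan with highest_row/highest_col accumulators.

-- ===== PORT A =====
-- literal transliteration of A: full scan over all (row, col), accumulating
-- (highest_row, highest_col), then the final -1/-1 check
def highest_ai_stone (checkers_board : List (List Int)) (ai_num : Int) : Option (Int × Int) :=
  let st :=
    (PySem.List.pyRange 0 (checkers_board.length : Int) 1).foldl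
      (fun s row =>
        let rl := PySem.List.pyGetD checkers_board row []
        (PySem.List.pyRange 0 (rl.length : Int) 1).foldl
          (fun s2 col =>
            if PySem.List.pyGetD rl col 0 = ai_num then
              if row > s2.1 then (row, col) else s2
            else s2) s)
      (-1, -1)
  if st.1 = -1 ∧ st.2 = -1 then none else some st

-- ===== PORT B =====
-- B's countdown loop 'for row in range(len(board)-1, -1, -1)' as structural
-- recursion on the row counter: fbAux b ai n inspects rows n-1, n-2, …, 0
def fbAux (checkers_board : List (List Int)) (ai_num : Int) : Nat → Option (Int × Int)
  | 0 => none
  | n + 1 =>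
    let rl := checkers_board.getD n []
    if ai_num ∈ rl then some ((n : Int), (((PySem.List.index? rl ai_num).getD 0 : Nat) : Int))
    else fbAux checkers_board ai_num n

def highest_ai_stone_alt (checkers_board : List (List Int)) (ai_num : Int) : Option (Int × Int) :=
  fbAux checkers_board ai_num checkers_board.length

-- ===== PRECONDITION & SPEC =====
def Spec_highest_ai_stone (checkers_board : List (List Int)) (ai_num : Int) (out : Option (Int × Int)) : Prop := out = highest_ai_stone_alt checkers_board ai_num
instance (checkers_board : List (List Int)) (ai_num : Int) (out : Option (Int × Int)) : Decidable (Spec_highest_ai_stone checkers_board ai_num out) := by unfold Spec_highest_ai_stone; infer_instance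

-- ===== CLAIM (what is proved, stated in full; the proofs are below) =====
def Claim_equal_highest_ai_stone : Prop := ∀ (checkers_board : List (List Int)) (ai_num : Int), Dom_highest_ai_stone checkers_board ai_num → Spec_highest_ai_stone checkers_board ai_num (highest_ai_stone checkers_board ai_num)

-- ===== LEMMAS AND PROOFS =====

-- The row index stored by fbAux is the (nonnegative) index of a row below n.
theorem fbAux_bounds (b : List (List Int)) (ai : Int) :
    ∀ n p, fbAux b ai n = some p → 0 ≤ p.1 ∧ p.1 < (n : Int) := by
  intro n
  induction n with
  | zero => intro p h; simp [fbAux] at h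
  | succ n ih =>
    intro p h
    simp only [fbAux] at h
    split at h
    · cases h
      exact ⟨by positivity, by push_cast; omega⟩
    · rcases ih p h with ⟨h1, h2⟩
      exact ⟨h1, lt_trans h2 (by push_cast; omega)⟩

-- A's inner column loop over row rl, entered with state s whose row component is
-- below the current row r, ends in (r, first index of ai) if ai occurs, else s.
theorem inner_loop (rl : List Int) (ai r : Int) (s : Int × Int) (hs : s.1 < r) :
    ∀ n, n ≤ rl.length →
      (PySem.List.pyRange 0 (n : Int) 1).foldl
        (fun s2 col =>
          if PySem.List.pyGetD rl col 0 = ai then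
            if r > s2.1 then (r, col) else s2
          else s2) s
      = (match PySem.List.index? (rl.take n) ai with
         | none => s
         | some i => (r, (i : Int))) := by
  intro n
  induction n with
  | zero => intro _; simp
  | succ n ih =>
    intro hn
    have hn' : n ≤ rl.length := Nat.le_of_succ_le hn
    have hlt : n < rl.length := hn
    have hsplit : PySem.List.pyRange 0 ((n + 1 : Nat) : Int) 1
        = PySem.List.pyRange 0 (n : Int) 1 ++ [(n : Int)] := by
      push_cast
      exact PySem.List.pyRange_one_succ_right (by positivity)
    rw [hsplit, List.foldl_append, ih hn']
    have htake : rl.take (n + 1) = rl.take n ++ [rl[n]] := by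
      rw [List.take_add_one]
      simp [List.getElem?_eq_getElem hlt]
    have hget : PySem.List.pyGetD rl ((n : Nat) : Int) 0 = rl[n] := by
      rw [PySem.List.pyGetD_natCast rl n 0, List.getD_eq_getElem _ _ hlt]
    rw [htake]
    simp only [List.foldl_cons, List.foldl_nil, hget]
    cases hidx : PySem.List.index? (rl.take n) ai with
    | none =>
      have hnot : ai ∉ rl.take n := (PySem.List.index?_eq_none_iff _ _).mp hidx
      by_cases hv : rl[n] = ai
      · rw [hv, PySem.List.index?_append_singleton_self _ ai hnot]
        simp [hs, List.length_take, Nat.min_eq_left hn']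
      · have hnot2 : ai ∉ rl.take n ++ [rl[n]] := by
          intro h
          rcases List.mem_append.mp h with h | h
          · exact hnot h
          · exact hv (List.mem_singleton.mp h).symm
        rw [(PySem.List.index?_eq_none_iff _ _).mpr hnot2]
        simp [hv]
    | some i =>
      have hmem : ai ∈ rl.take n := by
        by_contra hc
        rw [(PySem.List.index?_eq_none_iff _ _).mpr hc] at hidx
        simp at hidx
      rw [PySem.List.index?_append_of_mem _ hmem, hidx]
      by_cases hv : rl[n] = ai <;> simp [hv]

-- A's outer row loop after the first n rows carries exactly B's answer for those rows
-- (encoded as (-1, -1) when there is none).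
theorem outer_loop (b : List (List Int)) (ai : Int) :
    ∀ n, n ≤ b.length →
      (PySem.List.pyRange 0 (n : Int) 1).foldl
        (fun s row =>
          let rl := PySem.List.pyGetD b row []
          (PySem.List.pyRange 0 (rl.length : Int) 1).foldl
            (fun s2 col =>
              if PySem.List.pyGetD rl col 0 = ai then
                if row > s2.1 then (row, col) else s2
              else s2) s)
        (-1, -1)
      = (match fbAux b ai n with
         | none => ((-1 : Int), (-1 : Int))
         | some p => p) := by
  intro n
  induction n with
  | zero => intro _; simp [fbAux]
  | succ n ih =>
    intro hn
    have hn' : n ≤ b.length := Nat.le_of_succ_le hn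
    have hsplit : PySem.List.pyRange 0 ((n + 1 : Nat) : Int) 1
        = PySem.List.pyRange 0 (n : Int) 1 ++ [(n : Int)] := by
      push_cast
      exact PySem.List.pyRange_one_succ_right (by positivity)
    rw [hsplit, List.foldl_append, ih hn']
    set s : Int × Int := (match fbAux b ai n with
         | none => ((-1 : Int), (-1 : Int))
         | some p => p) with hs_def
    have hs : s.1 < (n : Int) := by
      cases hfb : fbAux b ai n with
      | none =>
        have : (0 : Int) ≤ (n : Int) := Int.natCast_nonneg n
        simp only [hs_def, hfb]
        omega
      | some p =>
        have := (fbAux_bounds b ai n p hfb).2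
        simp [hs_def, hfb, this]
    have hget : PySem.List.pyGetD b ((n : Nat) : Int) [] = b.getD n [] :=
      PySem.List.pyGetD_natCast b n []
    simp only [List.foldl_cons, List.foldl_nil, hget]
    rw [inner_loop (b.getD n []) ai (n : Int) s hs _ (le_refl _)]
    rw [List.take_length]
    simp only [fbAux]
    cases hidx : PySem.List.index? (b.getD n []) ai with
    | none =>
      have hnot : ai ∉ b.getD n [] := (PySem.List.index?_eq_none_iff _ _).mp hidx
      rw [if_neg hnot]
    | some i =>
      have hmem : ai ∈ b.getD n [] := by
        by_contra hc
        rw [(PySem.List.index?_eq_none_iff _ _).mpr hc] at hidx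
        simp at hidx
      rw [if_pos hmem]
      rfl

-- ===== VERDICT (by name: the statement is the Claim_ definition above) =====
theorem highest_ai_stone_spec : Claim_equal_highest_ai_stone := by
  intro b ai _
  show highest_ai_stone b ai = highest_ai_stone_alt b ai
  unfold highest_ai_stone highest_ai_stone_alt
  rw [outer_loop b ai b.length (le_refl _)]
  cases hfb : fbAux b ai b.length with
  | none => simp
  | some p =>
    have h0 := (fbAux_bounds b ai b.length p hfb).1
    simp only
    rw [if_neg]
    intro ⟨h1, _⟩
    omega
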